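-- pv_equiv track=rewrite | github.com/bysse/advent-of-code | 2021/python/day17.py | sim_y
-- ===== SOURCE A (Python) =====
-- def sim_y(y0, y1):
--     results = []
--
--     for yv0 in range(-500, 500):
--         yv = yv0
--         y = 0
--         y_max = y
--         for _ in range(500):
--             y += yv
--             y_max = max(y, y_max)
--             if y0 <= y and y <= y1:
--                 results.append((yv0, y_max))
--                 break
--             if y < y0:
--                 break
--             yv -= 1
--     return results
-- ===== SOURCE B (Python) =====
-- def sim_y(y0, y1):
--     results = []
--     for yv0 in range(-500, 500):
--         for k in range(1, 501):
--             y = k * yv0 - k * (k - 1) // 2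
--             if y0 <= y <= y1:
--                 peak = y if k <= yv0 else (yv0 * (yv0 + 1) // 2 if yv0 > 0 else 0)
--                 results.append((yv0, peak))
--                 break
--             if y < y0:
--                 break
--     return results
-- ===== Notes on version B (the rewrite author's own statement) =====
-- stated objective: alternative
-- what changed: Replaces A's step-by-step simulation of position/velocity/peak state by closed-form evaluation: position after k steps is k*yv0 - k*(k-1)//2 and the peak at a hit is computed directly (y itself while rising, yv0*(yv0+1)//2 after the apex, 0 for non-positive yv0), so the inner loop carries no mutable state.
import Mathlib
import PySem

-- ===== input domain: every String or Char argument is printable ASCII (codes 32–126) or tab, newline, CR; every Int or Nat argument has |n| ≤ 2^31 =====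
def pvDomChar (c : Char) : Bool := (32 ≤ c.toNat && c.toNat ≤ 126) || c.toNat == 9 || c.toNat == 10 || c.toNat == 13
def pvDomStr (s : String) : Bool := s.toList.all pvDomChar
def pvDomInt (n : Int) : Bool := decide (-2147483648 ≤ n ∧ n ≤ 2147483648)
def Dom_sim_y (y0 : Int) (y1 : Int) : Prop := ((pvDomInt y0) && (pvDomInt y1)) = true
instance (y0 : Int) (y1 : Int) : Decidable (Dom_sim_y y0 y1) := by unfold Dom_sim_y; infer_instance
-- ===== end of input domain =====

-- B replaces A's step-by-step velocity/position/peak simulation by closed-form position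
-- k*yv0 - k*(k-1)//2 and closed-form peak per candidate step (objective: alternative, same cost).

-- ===== PORT A =====
-- inner 'for _ in range(500)' loop of A, with mutable state (yv, y, y_max) and break
def simyLoopA (y0 : Int) (y1 : Int) (yv0 : Int) : Nat → Int → Int → Int → List (Int × Int) → List (Int × Int)
  | 0, _, _, _, results => results
  | n + 1, yv, y, yMax, results =>
    let y' := y + yv
    let yMax' := max y' yMax
    if y0 ≤ y' ∧ y' ≤ y1 then results ++ [(yv0, yMax')]
    else if y' < y0 then results
    else simyLoopA y0 y1 yv0 n (yv - 1) y' yMax' results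

def sim_y (y0 : Int) (y1 : Int) : List (Int × Int) :=
  (PySem.List.pyRange (-500) 500 1).foldl
    (fun results yv0 => simyLoopA y0 y1 yv0 500 yv0 0 0 results) []

-- ===== PORT B =====
-- inner 'for k in range(1, 501)' loop of B: closed-form y per step, break on hit/miss
def simyScan (y0 : Int) (y1 : Int) (yv0 : Int) : List Int → Option (Int × Int)
  | [] => none
  | k :: ks =>
    let y := k * yv0 - PySem.Int.floordiv (k * (k - 1)) 2
    if y0 ≤ y ∧ y ≤ y1 then
      some (yv0, if k ≤ yv0 then y else (if 0 < yv0 then PySem.Int.floordiv (yv0 * (yv0 + 1)) 2 else 0))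
    else if y < y0 then none
    else simyScan y0 y1 yv0 ks

def sim_y_alt (y0 : Int) (y1 : Int) : List (Int × Int) :=
  (PySem.List.pyRange (-500) 500 1).foldl
    (fun results yv0 =>
      match simyScan y0 y1 yv0 (PySem.List.pyRange 1 501 1) with
      | some p => results ++ [p]
      | none => results) []

-- ===== PRECONDITION & SPEC =====
def Spec_sim_y (y0 : Int) (y1 : Int) (out : List (Int × Int)) : Prop := out = sim_y_alt y0 y1
instance (y0 : Int) (y1 : Int) (out : List (Int × Int)) : Decidable (Spec_sim_y y0 y1 out) := by unfold Spec_sim_y; infer_instance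

-- ===== CLAIM (what is proved, stated in full; the proofs are below) =====
def Claim_equal_sim_y : Prop := ∀ (y0 : Int) (y1 : Int), Dom_sim_y y0 y1 → Spec_sim_y y0 y1 (sim_y y0 y1)

-- ===== LEMMAS AND PROOFS =====

-- triangle numbers: pvE j = 0 + 1 + … + (j-1)
def pvE : Nat → Int
  | 0 => 0
  | j + 1 => pvE j + j

-- closed-form position after j steps
def pvY (yv0 : Int) (j : Nat) : Int := (j : Int) * yv0 - pvE j
-- closed-form running maximum after j steps
def pvM (yv0 : Int) (j : Nat) : Int :=
  if (j : Int) ≤ yv0 then pvY yv0 j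
  else if 0 < yv0 then PySem.Int.floordiv (yv0 * (yv0 + 1)) 2 else 0

lemma pvFdiv2 (m : Int) : PySem.Int.floordiv (2 * m) 2 = m := by
  rw [PySem.Int.floordiv_eq_ediv_of_pos (by norm_num)]
  exact Int.mul_ediv_cancel_left m (by norm_num)

lemma pvTwoE (j : Nat) : 2 * pvE j = (j : Int) * ((j : Int) - 1) := by
  induction j with
  | zero => simp [pvE]
  | succ n ih =>
    show 2 * (pvE n + (n : Int)) = ((n + 1 : Nat) : Int) * (((n + 1 : Nat) : Int) - 1)
    push_cast
    linear_combination ih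

lemma pvYrec (yv0 : Int) (j : Nat) : pvY yv0 (j + 1) = pvY yv0 j + (yv0 - (j : Int)) := by
  show ((j + 1 : Nat) : Int) * yv0 - (pvE j + (j : Int)) = (j : Int) * yv0 - pvE j + (yv0 - (j : Int))
  push_cast
  ring

lemma pvY0 (yv0 : Int) : pvY yv0 0 = 0 := by simp [pvY, pvE]

lemma pvM0 (yv0 : Int) : pvM yv0 0 = 0 := by
  unfold pvM
  split_ifs with h1 h2
  · exact pvY0 yv0
  · simp at h1; omega
  · rfl

lemma pvStepY (yv0 : Int) (j : Nat) :
    ((j : Int) + 1) * yv0 - PySem.Int.floordiv (((j : Int) + 1) * (((j : Int) + 1) - 1)) 2 = pvY yv0 (j + 1) := by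
  have h1 : ((j : Int) + 1) * (((j : Int) + 1) - 1) = 2 * pvE (j + 1) := by
    have h := pvTwoE (j + 1)
    push_cast at h
    linarith
  rw [h1, pvFdiv2]
  show _ = ((j + 1 : Nat) : Int) * yv0 - pvE (j + 1)
  push_cast
  ring

lemma pvTri (yv0 : Int) (h : 0 < yv0) :
    2 * PySem.Int.floordiv (yv0 * (yv0 + 1)) 2 = yv0 * (yv0 + 1) := by
  obtain ⟨r, hr⟩ := Int.even_mul_succ_self yv0
  rw [hr, show r + r = 2 * r by ring, pvFdiv2]

lemma pvMrec (yv0 : Int) (j : Nat) : max (pvY yv0 (j + 1)) (pvM yv0 j) = pvM yv0 (j + 1) := by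
  have hK : (0 : Int) ≤ (j : Int) := Int.natCast_nonneg j
  have hrec := pvYrec yv0 j
  have hYj : 2 * pvY yv0 j = 2 * (j : Int) * yv0 - (j : Int) * ((j : Int) - 1) := by
    show 2 * ((j : Int) * yv0 - pvE j) = _
    linear_combination - pvTwoE j
  have hY1 : 2 * pvY yv0 (j + 1) = 2 * ((j : Int) + 1) * yv0 - ((j : Int) + 1) * (j : Int) := by
    show 2 * (((j + 1 : Nat) : Int) * yv0 - pvE (j + 1)) = _
    have h := pvTwoE (j + 1)
    push_cast at h ⊢
    linear_combination - h
  rcases lt_trichotomy yv0 ((j : Int)) with hlt | heq | hgt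
  · -- yv0 < j : past the peak on both sides
    by_cases hpos : 0 < yv0
    · have e1 : pvM yv0 j = PySem.Int.floordiv (yv0 * (yv0 + 1)) 2 := by
        unfold pvM; rw [if_neg (by omega), if_pos hpos]
      have e2 : pvM yv0 (j + 1) = PySem.Int.floordiv (yv0 * (yv0 + 1)) 2 := by
        unfold pvM; rw [if_neg (by push_cast; omega), if_pos hpos]
      have hT := pvTri yv0 hpos
      have hp : 0 ≤ ((j : Int) + 1 - yv0) * ((j : Int) - yv0) :=
        mul_nonneg (by omega) (by omega)
      have hle : pvY yv0 (j + 1) ≤ PySem.Int.floordiv (yv0 * (yv0 + 1)) 2 := by nlinarith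
      rw [e1, e2]; exact max_eq_right hle
    · have e1 : pvM yv0 j = 0 := by
        unfold pvM; rw [if_neg (by omega), if_neg hpos]
      have e2 : pvM yv0 (j + 1) = 0 := by
        unfold pvM; rw [if_neg (by push_cast; omega), if_neg hpos]
      have t1 : 0 ≤ ((j : Int) + 1) * (j : Int) := mul_nonneg (by omega) hK
      have t2 : 0 ≤ ((j : Int) + 1) * (-yv0) := mul_nonneg (by omega) (by omega)
      have hle : pvY yv0 (j + 1) ≤ 0 := by nlinarith
      rw [e1, e2]; exact max_eq_right hle
  · -- yv0 = j : at the peak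
    have e1 : pvM yv0 j = pvY yv0 j := by unfold pvM; rw [if_pos (by omega)]
    by_cases hpos : 0 < yv0
    · have e2 : pvM yv0 (j + 1) = PySem.Int.floordiv (yv0 * (yv0 + 1)) 2 := by
        unfold pvM; rw [if_neg (by push_cast; omega), if_pos hpos]
      have hT := pvTri yv0 hpos
      have key2 : 2 * pvY yv0 j = 2 * PySem.Int.floordiv (yv0 * (yv0 + 1)) 2 := by
        linear_combination hYj - hT + ((j : Int) - yv0 - 1) * heq
      have key : pvY yv0 j = PySem.Int.floordiv (yv0 * (yv0 + 1)) 2 := by omega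
      have hY1e : pvY yv0 (j + 1) = pvY yv0 j := by omega
      rw [e1, e2, hY1e, key, max_self]
    · have hj : (j : Int) = 0 := by omega
      have e2 : pvM yv0 (j + 1) = 0 := by
        unfold pvM; rw [if_neg (by push_cast; omega), if_neg hpos]
      have key2 : 2 * pvY yv0 j = 0 := by
        linear_combination hYj + (2 * yv0 - (j : Int) + 1) * hj
      have h1 : pvY yv0 j = 0 := by omega
      have h2 : pvY yv0 (j + 1) = 0 := by omega
      rw [e1, e2, h1, h2, max_self]
  · -- j < yv0 : still rising
    have e1 : pvM yv0 j = pvY yv0 j := by unfold pvM; rw [if_pos (le_of_lt hgt)]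
    have e2 : pvM yv0 (j + 1) = pvY yv0 (j + 1) := by
      unfold pvM; rw [if_pos (by push_cast; omega)]
    rw [e1, e2]
    exact max_eq_left (by omega)

lemma pvLoopEqScan (y0 y1 yv0 : Int) : ∀ (n j : Nat) (res : List (Int × Int)),
    simyLoopA y0 y1 yv0 n (yv0 - (j : Int)) (pvY yv0 j) (pvM yv0 j) res =
      (match simyScan y0 y1 yv0 (PySem.List.pyRange ((j : Int) + 1) ((j : Int) + 1 + (n : Int)) 1) with
       | some p => res ++ [p]
       | none => res) := by
  intro n
  induction n with
  | zero =>
    intro j res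
    rw [show ((j : Int) + 1 + ((0 : Nat) : Int)) = (j : Int) + 1 by push_cast; ring]
    rw [PySem.List.pyRange_one_eq_nil (le_refl _)]
    simp [simyLoopA, simyScan]
  | succ n ih =>
    intro j res
    have hcons : PySem.List.pyRange ((j : Int) + 1) ((j : Int) + 1 + ((n + 1 : Nat) : Int)) 1 =
        ((j : Int) + 1) :: PySem.List.pyRange ((j : Int) + 1 + 1) ((j : Int) + 1 + ((n + 1 : Nat) : Int)) 1 := by
      apply PySem.List.pyRange_one_cons
      push_cast
      omega
    rw [hcons]
    simp only [simyLoopA, simyScan]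
    have hy' : pvY yv0 j + (yv0 - (j : Int)) = pvY yv0 (j + 1) := (pvYrec yv0 j).symm
    simp only [hy', pvMrec yv0 j, pvStepY yv0 j]
    by_cases hhit : y0 ≤ pvY yv0 (j + 1) ∧ pvY yv0 (j + 1) ≤ y1
    · rw [if_pos hhit, if_pos hhit]
      have hpeak : (if ((j : Int) + 1) ≤ yv0 then pvY yv0 (j + 1)
          else if 0 < yv0 then PySem.Int.floordiv (yv0 * (yv0 + 1)) 2 else 0) = pvM yv0 (j + 1) := by
        unfold pvM
        push_cast
        rfl
      rw [hpeak]
    · rw [if_neg hhit, if_neg hhit]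
      by_cases hmiss : pvY yv0 (j + 1) < y0
      · rw [if_pos hmiss, if_pos hmiss]
      · rw [if_neg hmiss, if_neg hmiss]
        have harg : (yv0 - (j : Int)) - 1 = yv0 - ((j + 1 : Nat) : Int) := by push_cast; ring
        rw [harg, ih (j + 1) res]
        congr 3
        push_cast
        ring

lemma pvInnerEq (y0 y1 yv0 : Int) (res : List (Int × Int)) :
    simyLoopA y0 y1 yv0 500 yv0 0 0 res =
      (match simyScan y0 y1 yv0 (PySem.List.pyRange 1 501 1) with
       | some p => res ++ [p]
       | none => res) := by
  have h := pvLoopEqScan y0 y1 yv0 500 0 res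
  rw [pvY0, pvM0] at h
  rw [show yv0 - ((0 : Nat) : Int) = yv0 by norm_num] at h
  rw [show (((0 : Nat) : Int) + 1) = 1 by norm_num] at h
  rw [show ((1 : Int) + ((500 : Nat) : Int)) = 501 by norm_num] at h
  exact h

-- ===== VERDICT (by name: the statement is the Claim_ definition above) =====
set_option maxRecDepth 8000 in
theorem sim_y_spec : Claim_equal_sim_y := by
  intro y0 y1 _
  unfold Spec_sim_y sim_y sim_y_alt
  apply PySem.List.foldl_congr_mem
  intro acc yv0 _
  exact pvInnerEq y0 y1 yv0 acc
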